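-- pv_equiv track=rewrite | github.com/Casey0Kane/code-katas | src/test_all_inclusive.py | rotations_array_sol32
-- ===== SOURCE A (Python) =====
-- def rotations_array_sol32(strng):
--     result = []
--     for mid in range(len(strng)):
--         rot = strng[mid:] + strng[:mid]
--         if rot in result:
--             return result
--         else:
--             result.append(rot)
--     return result
-- ===== SOURCE B (Python) =====
-- def rotations_array_sol32(strng):
--     if not strng:
--         return []
--     p = 1
--     while strng[p:] + strng[:p] != strng:
--         p += 1
--     return [strng[i:] + strng[:i] for i in range(p)]
-- ===== Notes on version B (the rewrite author's own statement) =====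
-- stated objective: faster
-- what changed: A grows the result list and scans it for a duplicate rotation at every step; B first finds the minimal period p by scanning p = 1,2,... until strng[p:]+strng[:p] == strng, then emits the p rotations in one generation pass.
import Mathlib
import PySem

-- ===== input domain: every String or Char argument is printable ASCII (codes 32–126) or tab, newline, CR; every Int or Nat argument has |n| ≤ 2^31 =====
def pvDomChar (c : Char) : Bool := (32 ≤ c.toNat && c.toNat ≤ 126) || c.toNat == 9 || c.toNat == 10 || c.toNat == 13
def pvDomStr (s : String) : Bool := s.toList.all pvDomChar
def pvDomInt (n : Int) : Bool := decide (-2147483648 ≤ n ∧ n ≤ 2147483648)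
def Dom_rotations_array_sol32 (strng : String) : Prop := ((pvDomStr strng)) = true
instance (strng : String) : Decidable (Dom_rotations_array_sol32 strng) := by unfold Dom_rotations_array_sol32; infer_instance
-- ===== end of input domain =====

-- B replaces A's grow-until-duplicate membership loop by a minimal-period scan followed by one
-- generation pass (alternative decomposition; also avoids the repeated list-membership scans).

-- ===== PORT A =====
-- A's loop body: rot = strng[mid:] + strng[:mid]; early return on duplicate, else append.
def rotAuxA (l : List Char) : List Nat → List String → List String
  | [], result => result
  | mid :: rest, result =>
    let rot := String.ofList (PySem.Chars.slice l (some (mid : Int)) none ++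
                              PySem.Chars.slice l none (some (mid : Int)))
    if rot ∈ result then result else rotAuxA l rest (result ++ [rot])

def rotations_array_sol32 (strng : String) : List String :=
  rotAuxA strng.toList (List.range strng.toList.length) []

-- ===== PORT B =====
-- B's while loop: p += 1 until strng[p:]+strng[:p] == strng.  The 'l.length ≤ p' guard only
-- makes the recursion total; it is never the deciding branch on the reachable calls (p ≤ period).
def findPeriod (l : List Char) (p : Nat) : Nat :=
  if l.length ≤ p then p
  else if PySem.Chars.slice l (some (p : Int)) none ++
          PySem.Chars.slice l none (some (p : Int)) = l then p
  else findPeriod l (p + 1)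
termination_by l.length - p
decreasing_by omega

def rotations_array_sol32_alt (strng : String) : List String :=
  let l := strng.toList
  if l = [] then []
  else
    let p := findPeriod l 1
    (List.range p).map (fun (i : Nat) => String.ofList (PySem.Chars.slice l (some (i : Int)) none ++
                                                PySem.Chars.slice l none (some (i : Int))))

-- ===== PRECONDITION & SPEC =====
def Spec_rotations_array_sol32 (strng : String) (out : List String) : Prop := out = rotations_array_sol32_alt strng
instance (strng : String) (out : List String) : Decidable (Spec_rotations_array_sol32 strng out) := by unfold Spec_rotations_array_sol32; infer_instance

-- ===== CLAIM (what is proved, stated in full; the proofs are below) =====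
def Claim_equal_rotations_array_sol32 : Prop := ∀ (strng : String), Dom_rotations_array_sol32 strng → Spec_rotations_array_sol32 strng (rotations_array_sol32 strng)

-- ===== LEMMAS AND PROOFS =====

-- the rotation string both ports build
def rotStr (l : List Char) (i : Nat) : String :=
  String.ofList (PySem.Chars.slice l (some (i : Int)) none ++
                 PySem.Chars.slice l none (some (i : Int)))

theorem rotStr_eq_rotate (l : List Char) (i : Nat) (h : i ≤ l.length) :
    rotStr l i = String.ofList (l.rotate i) := by
  simp [rotStr, PySem.Chars.slice_eq_listSlice, PySem.List.slice_from, PySem.List.slice_to,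
    List.rotate_eq_drop_append_take h]

-- a collision between two rotations yields a period
theorem period_of_collision (l : List Char) (a b : Nat) (hab : a < b) (hb : b ≤ l.length)
    (h : l.rotate a = l.rotate b) : l.rotate (b - a) = l := by
  have h2 := congrArg (List.rotate · (l.length - a)) h
  simp only [List.rotate_rotate] at h2
  have ha : a + (l.length - a) = l.length := by omega
  have hb2 : b + (l.length - a) = l.length + (b - a) := by omega
  rw [ha, hb2, ← List.rotate_rotate, List.rotate_length] at h2
  exact h2.symm

-- rotations repeat with period p
theorem rotate_of_period (l : List Char) (p k : Nat) (hpr : l.rotate p = l) (hpk : p ≤ k) :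
    l.rotate k = l.rotate (k - p) := by
  calc l.rotate k = (l.rotate p).rotate (k - p) := by
        rw [List.rotate_rotate]; congr 1; omega
    _ = l.rotate (k - p) := by rw [hpr]

-- A's loop, run from index k with the first k rotations accumulated, produces the first p
-- rotations (p = the minimal period, given abstractly).
theorem rotAuxA_spec (l : List Char) (p : Nat)
    (hp0 : 0 < p) (hpr : l.rotate p = l) (hpn : p ≤ l.length)
    (hle : ∀ d, 0 < d → l.rotate d = l → p ≤ d) :
    ∀ k, k ≤ p →
      rotAuxA l (List.range' k (l.length - k)) ((List.range k).map (rotStr l)) =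
        (List.range p).map (rotStr l) := by
  intro k hk
  induction hn : l.length - k generalizing k with
  | zero =>
    have hkp : k = p := by omega
    simp [rotAuxA, hkp]
  | succ m ih =>
    have hkn : k < l.length := by omega
    rw [List.range'_succ]
    show rotAuxA l (k :: List.range' (k+1) m) _ = _
    simp only [rotAuxA]
    have hmem : (rotStr l k ∈ (List.range k).map (rotStr l)) ↔ p ≤ k := by
      constructor
      · intro hm
        obtain ⟨j, hj, hjk⟩ := List.mem_map.mp hm
        rw [List.mem_range] at hj
        have hrot : l.rotate j = l.rotate k := by
          have := hjk
          rw [rotStr_eq_rotate l j (by omega), rotStr_eq_rotate l k (by omega)] at this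
          exact String.ofList_inj.mp this
        have hper := period_of_collision l j k hj (by omega) hrot
        have := hle (k - j) (by omega) hper
        omega
      · intro hpk
        apply List.mem_map.mpr
        refine ⟨k - p, List.mem_range.mpr (by omega), ?_⟩
        rw [rotStr_eq_rotate l (k - p) (by omega), rotStr_eq_rotate l k (by omega)]
        rw [rotate_of_period l p k hpr hpk]
    by_cases hpk : p ≤ k
    · have hkp : k = p := by omega
      rw [if_pos ((by simpa [rotStr] using hmem.mpr hpk))]
      rw [hkp]
    · rw [if_neg (by simpa [rotStr] using (fun h => hpk (hmem.mp h)))]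
      have hstep : ((List.range k).map (rotStr l)) ++
          [String.ofList (PySem.Chars.slice l (some (k : Int)) none ++
                          PySem.Chars.slice l none (some (k : Int)))] =
          (List.range (k+1)).map (rotStr l) := by
        rw [List.range_succ, List.map_append]
        rfl
      rw [hstep]
      exact ih (k+1) (by omega) (by omega)

-- B's while loop finds p when started at any q with 1 ≤ q ≤ p.
theorem findPeriod_spec (l : List Char) (p : Nat)
    (hpr : l.rotate p = l) (hpn : p ≤ l.length)
    (hle : ∀ d, 0 < d → l.rotate d = l → p ≤ d) :
    ∀ q, 0 < q → q ≤ p → findPeriod l q = p := by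
  intro q hq0 hqp
  induction hn : p - q generalizing q with
  | zero =>
    have hqp' : q = p := by omega
    subst hqp'
    unfold findPeriod
    by_cases hg : l.length ≤ q
    · rw [if_pos hg]
    · rw [if_neg hg, if_pos]
      rw [show PySem.Chars.slice l (some (q:Int)) none ++ PySem.Chars.slice l none (some (q:Int))
            = l.rotate q from by
        simp [PySem.Chars.slice_eq_listSlice, PySem.List.slice_from, PySem.List.slice_to,
          List.rotate_eq_drop_append_take (show q ≤ l.length from hpn)]]
      exact hpr
  | succ m ih =>
    have hql : q < l.length := by omega
    unfold findPeriod
    rw [if_neg (by omega), if_neg, ih (q+1) (by omega) (by omega) (by omega)]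
    rw [show PySem.Chars.slice l (some (q:Int)) none ++ PySem.Chars.slice l none (some (q:Int))
          = l.rotate q from by
      simp [PySem.Chars.slice_eq_listSlice, PySem.List.slice_from, PySem.List.slice_to,
        List.rotate_eq_drop_append_take (show q ≤ l.length from by omega)]]
    intro hrot
    have := hle q hq0 hrot
    omega

-- ===== VERDICT (by name: the statement is the Claim_ definition above) =====
theorem rotations_array_sol32_spec : Claim_equal_rotations_array_sol32 := by
  intro strng _
  unfold Spec_rotations_array_sol32 rotations_array_sol32 rotations_array_sol32_alt
  by_cases hl : strng.toList = []
  · simp [hl, rotAuxA]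
  · rw [if_neg hl]
    set l := strng.toList with hldef
    have hn : 0 < l.length := List.length_pos_iff.mpr hl
    have hex : ∃ d, 0 < d ∧ l.rotate d = l := ⟨l.length, hn, List.rotate_length l⟩
    set p := Nat.find hex with hpdef
    obtain ⟨hp0, hpr⟩ := Nat.find_spec hex
    have hle : ∀ d, 0 < d → l.rotate d = l → p ≤ d := fun d h1 h2 => Nat.find_le ⟨h1, h2⟩
    have hpn : p ≤ l.length := hle l.length hn (List.rotate_length l)
    have hfp : findPeriod l 1 = p := findPeriod_spec l p hpr hpn hle 1 (by omega) hp0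
    have hA := rotAuxA_spec l p hp0 hpr hpn hle 0 (by omega)
    simp only [Nat.sub_zero, List.range_zero, List.map_nil] at hA
    rw [show List.range l.length = List.range' 0 l.length from List.range_eq_range']
    rw [hA, hfp]
    rfl
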